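-- pv_equiv track=rewrite | github.com/elegantandrogyne/rpi2casterd | rpi2caster_driver/converters.py | ordered_signals
-- ===== SOURCE A (Python) =====
-- from collections import deque, OrderedDict
--
-- ORDERED_SIGNALS = tuple(['0075', 'S', '0005', *'ABCDEFGHIJKLMN',
--                          *(str(x) for x in range(1, 15)), 'O15'])
--
-- def ordered_signals(source):
--     """Returns a list of arranged signals ready for display"""
--     arranged = deque(s for s in ORDERED_SIGNALS if s in source)
--     # put NI, NL, NK, NJ, NKJ etc. at the front
--     if 'N' in arranged:
--         for other in 'JKLI':
--             if other in source:
--                 arranged.remove('N')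
--                 arranged.appendleft(other)
--                 arranged.appendleft('N')
--     return list(arranged)
-- ===== SOURCE B (Python) =====
-- ORDERED_SIGNALS = tuple(['0075', 'S', '0005', *'ABCDEFGHIJKLMN',
--                          *(str(x) for x in range(1, 15)), 'O15'])
--
-- def ordered_signals(source):
--     """Returns a list of arranged signals ready for display"""
--     arranged_ordered = [s for s in ORDERED_SIGNALS if s in source]
--     if 'N' not in source:
--         return arranged_ordered
--     priorities = [o for o in 'JKLI' if o in source]
--     if not priorities:
--         return arranged_ordered
--     return ['N'] + priorities[::-1] + [s for s in arranged_ordered if s != 'N']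
-- ===== Notes on version B (the rewrite author's own statement) =====
-- stated objective: simpler
-- what changed: Replaces the deque remove/appendleft mutation loop with a direct closed-form concatenation: the N signal, then the present priority letters in reversed processing order, then the filtered tail without N.
import Mathlib
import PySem

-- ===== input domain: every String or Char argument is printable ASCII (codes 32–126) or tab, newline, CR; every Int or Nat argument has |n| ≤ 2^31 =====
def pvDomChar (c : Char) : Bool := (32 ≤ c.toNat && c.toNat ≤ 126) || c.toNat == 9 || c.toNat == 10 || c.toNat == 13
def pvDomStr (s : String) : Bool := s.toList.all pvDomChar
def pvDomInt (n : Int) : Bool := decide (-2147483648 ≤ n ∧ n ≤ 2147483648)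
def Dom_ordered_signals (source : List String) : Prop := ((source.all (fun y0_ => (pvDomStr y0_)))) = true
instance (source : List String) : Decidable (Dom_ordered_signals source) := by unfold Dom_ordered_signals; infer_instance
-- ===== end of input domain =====

-- B replaces A's deque remove/appendleft mutation loop by a closed-form concatenation (simpler decomposition, same cost).

-- ===== PORT A =====
def pvOrderedSignals : List String :=
  ["0075", "S", "0005", "A", "B", "C", "D", "E", "F", "G", "H", "I", "J", "K", "L", "M", "N",
   "1", "2", "3", "4", "5", "6", "7", "8", "9", "10", "11", "12", "13", "14", "O15"]

-- deque.remove('N'): remove the first "N"; the ValueError branch of Python's remove is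
-- unreachable in A (the loop only runs with "N" present and re-adds it each iteration).
def pvRemoveN : List String → List String
  | [] => []
  | x :: xs => if x = "N" then xs else x :: pvRemoveN xs

def ordered_signals (source : List String) : List String :=
  let arranged := pvOrderedSignals.filter (fun s => decide (s ∈ source))
  if "N" ∈ arranged then
    ["J", "K", "L", "I"].foldl
      (fun arr other =>
        if other ∈ source then "N" :: other :: pvRemoveN arr else arr)
      arranged
  else arranged

-- ===== PORT B =====
def ordered_signals_alt (source : List String) : List String :=
  let arranged_ordered := pvOrderedSignals.filter (fun s => decide (s ∈ source))
  if "N" ∈ source then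
    let priorities := ["J", "K", "L", "I"].filter (fun o => decide (o ∈ source))
    if priorities = [] then arranged_ordered
    else "N" :: priorities.reverse ++ arranged_ordered.filter (fun s => decide (s ≠ "N"))
  else arranged_ordered

-- ===== PRECONDITION & SPEC =====
def Spec_ordered_signals (source : List String) (out : List String) : Prop := out = ordered_signals_alt source
instance (source : List String) (out : List String) : Decidable (Spec_ordered_signals source out) := by unfold Spec_ordered_signals; infer_instance

-- ===== CLAIM (what is proved, stated in full; the proofs are below) =====
def Claim_equal_ordered_signals : Prop := ∀ (source : List String), Dom_ordered_signals source → Spec_ordered_signals source (ordered_signals source)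

-- ===== LEMMAS AND PROOFS =====

-- first-occurrence removal = global filter when "N" occurs at most once
theorem pvRemoveN_eq_filter (l : List String) (h : l.count "N" ≤ 1) :
    pvRemoveN l = l.filter (fun s => !decide (s = "N")) := by
  induction l with
  | nil => rfl
  | cons x xs ih =>
    by_cases hx : x = "N"
    · subst hx
      simp only [List.count_cons_self] at h
      have h0 : xs.count "N" = 0 := by omega
      have hfe : xs.filter (fun s => !decide (s = "N")) = xs := by
        apply List.filter_eq_self.mpr
        intro a ha
        have hna : a ≠ "N" := by
          intro he; subst he
          exact absurd (List.count_pos_iff.mpr ha) (by omega)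
        simp [hna]
      simp [pvRemoveN, hfe]
    · have h' : xs.count "N" ≤ 1 := by
        calc xs.count "N" ≤ (x :: xs).count "N" := by simp [List.count_cons]
        _ ≤ 1 := h
      simp [pvRemoveN, hx, ih h']

theorem arranged_count_le (source : List String) :
    (pvOrderedSignals.filter (fun s => decide (s ∈ source))).count "N" ≤ 1 := by
  calc (pvOrderedSignals.filter (fun s => decide (s ∈ source))).count "N"
      ≤ pvOrderedSignals.count "N" := List.filter_sublist.count_le "N"
    _ = 1 := by decide

-- ===== VERDICT (by name: the statement is the Claim_ definition above) =====
theorem ordered_signals_spec : Claim_equal_ordered_signals := by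
  intro source _
  unfold Spec_ordered_signals ordered_signals ordered_signals_alt
  set arranged := pvOrderedSignals.filter (fun s => decide (s ∈ source)) with harr
  have hmem : ("N" ∈ arranged) ↔ ("N" ∈ source) := by
    rw [harr]
    constructor
    · intro h
      have := List.of_mem_filter h
      simpa using this
    · intro h
      exact List.mem_filter.mpr ⟨by decide, by simpa using h⟩
  have hrem : pvRemoveN arranged = arranged.filter (fun s => !decide (s = "N")) :=
    pvRemoveN_eq_filter _ (harr ▸ arranged_count_le source)
  by_cases hN : "N" ∈ source
  · by_cases hJ : "J" ∈ source <;> by_cases hK : "K" ∈ source <;>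
      by_cases hL : "L" ∈ source <;> by_cases hI : "I" ∈ source <;>
      simp [hmem, hN, hJ, hK, hL, hI, List.foldl, pvRemoveN, hrem]
  · simp [hmem, hN]
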